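-- pv_equiv track=rewrite | github.com/kymgriffins/FinBot | src/services/provider_registry.py | map_symbol_to_provider
-- ===== SOURCE A (Python) =====
-- from typing import Dict, Optional
--
-- CANONICAL_SYMBOL_MAP: Dict[str, Dict[str, str]] = {
--     'GOLD': {'yfinance': 'GC=F', 'fmp': 'GOLD', 'polygon': 'GC'},
--     'SILVER': {'yfinance': 'SI=F', 'fmp': 'SILVER', 'polygon': 'SI'},
--     'BTC': {'yfinance': 'BTC-USD', 'fmp': 'BTCUSD', 'polygon': 'BTCUSD'},
--     # extend as needed
-- }
--
-- def map_symbol_to_provider(input_symbol: str, provider: str) -> Optional[str]: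
--     if not input_symbol:
--         return None
--     s = input_symbol.strip().upper()
--
--     # direct canonical match
--     if s in CANONICAL_SYMBOL_MAP:
--         return CANONICAL_SYMBOL_MAP[s].get(provider) or s
--
--     # check if input already matches a provider-specific value
--     for canon, mapping in CANONICAL_SYMBOL_MAP.items():
--         for prov, sym in mapping.items():
--             if sym and sym.upper() == s:
--                 # return provider-specific symbol for desired provider
--                 return mapping.get(provider) or s
--
--     # fallback to input
--     return input_symbol
-- ===== SOURCE B (Python) =====
-- from typing import Dict, Optional
--
-- CANONICAL_SYMBOL_MAP: Dict[str, Dict[str, str]] = {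
--     'GOLD': {'yfinance': 'GC=F', 'fmp': 'GOLD', 'polygon': 'GC'},
--     'SILVER': {'yfinance': 'SI=F', 'fmp': 'SILVER', 'polygon': 'SI'},
--     'BTC': {'yfinance': 'BTC-USD', 'fmp': 'BTCUSD', 'polygon': 'BTCUSD'},
--     # extend as needed
-- }
--
-- # Reverse index built once: uppercased provider symbol -> its inner mapping.
-- REVERSE_INDEX: Dict[str, Dict[str, str]] = {}
-- for _canon, _mapping in CANONICAL_SYMBOL_MAP.items():
--     for _sym in _mapping.values():
--         if _sym:
--             REVERSE_INDEX[_sym.upper()] = _mapping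
--
-- def map_symbol_to_provider(input_symbol: str, provider: str) -> Optional[str]:
--     if not input_symbol:
--         return None
--     s = input_symbol.strip().upper()
--     if s in CANONICAL_SYMBOL_MAP:
--         return CANONICAL_SYMBOL_MAP[s].get(provider) or s
--     mapping = REVERSE_INDEX.get(s)
--     if mapping is not None:
--         return mapping.get(provider) or s
--     return input_symbol
-- ===== Notes on version B (the rewrite author's own statement) =====
-- stated objective: idiomatic
-- what changed: A's nested for-loops scanning every (provider, symbol) pair of CANONICAL_SYMBOL_MAP on each call are replaced by a single lookup in a reverse index (uppercased provider symbol -> inner mapping) built once at module load.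
import Mathlib
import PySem

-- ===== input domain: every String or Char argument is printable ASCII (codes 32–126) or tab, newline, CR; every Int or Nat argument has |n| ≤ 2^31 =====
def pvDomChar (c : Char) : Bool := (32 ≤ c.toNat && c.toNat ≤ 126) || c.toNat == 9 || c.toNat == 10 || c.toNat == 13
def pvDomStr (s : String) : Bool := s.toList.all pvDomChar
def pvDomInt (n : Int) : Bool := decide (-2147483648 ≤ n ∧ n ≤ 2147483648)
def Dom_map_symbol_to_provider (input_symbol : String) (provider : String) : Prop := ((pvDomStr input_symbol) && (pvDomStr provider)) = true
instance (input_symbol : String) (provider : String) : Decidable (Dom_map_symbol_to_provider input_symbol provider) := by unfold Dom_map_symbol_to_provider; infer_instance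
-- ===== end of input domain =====

-- B replaces A's nested scan over CANONICAL_SYMBOL_MAP with a single lookup in a reverse
-- index built once (uppercased provider symbol -> inner mapping); same return value everywhere.

-- ===== PORT A =====

def pvCanon : PySem.Dict String (PySem.Dict String String) :=
  PySem.Dict.ofList
    [("GOLD",   PySem.Dict.ofList [("yfinance", "GC=F"),    ("fmp", "GOLD"),   ("polygon", "GC")]),
     ("SILVER", PySem.Dict.ofList [("yfinance", "SI=F"),    ("fmp", "SILVER"), ("polygon", "SI")]),
     ("BTC",    PySem.Dict.ofList [("yfinance", "BTC-USD"), ("fmp", "BTCUSD"), ("polygon", "BTCUSD")])]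

-- Python's `x or s` for x = mapping.get(provider): s if x is None or "" else x
def pvOrS (v? : Option String) (s : String) : String :=
  match v? with
  | some v => if v = "" then s else v
  | none => s

-- inner loop: for prov, sym in mapping.items(): if sym and sym.upper() == s: return mapping.get(provider) or s
def pvScanInner (s provider : String) (m : PySem.Dict String String) :
    List (String × String) → Option String
  | [] => none
  | (_, sym) :: rest =>
    if sym ≠ "" ∧ PySem.Str.upper sym = s then some (pvOrS (m.get? provider) s)
    else pvScanInner s provider m rest

-- outer loop: for canon, mapping in CANONICAL_SYMBOL_MAP.items()
def pvScan (s provider : String) : List (String × PySem.Dict String String) → Option String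
  | [] => none
  | (_, m) :: rest =>
    match pvScanInner s provider m m.items with
    | some r => some r
    | none => pvScan s provider rest

def map_symbol_to_provider (input_symbol : String) (provider : String) : Option String :=
  if input_symbol = "" then none
  else
    let s := PySem.Str.upper (PySem.Str.strip input_symbol)
    match pvCanon.get? s with
    | some m => some (pvOrS (m.get? provider) s)
    | none =>
      match pvScan s provider pvCanon.items with
      | some r => some r
      | none => some input_symbol

-- ===== PORT B =====

-- reverse index built once from pvCanon (module-level loop in Source B)
def pvReverse : PySem.Dict String (PySem.Dict String String) :=
  pvCanon.items.foldl
    (fun d p =>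
      p.2.values.foldl
        (fun d sym => if sym ≠ "" then d.insert (PySem.Str.upper sym) p.2 else d) d)
    PySem.Dict.empty

def map_symbol_to_provider_alt (input_symbol : String) (provider : String) : Option String :=
  if input_symbol = "" then none
  else
    let s := PySem.Str.upper (PySem.Str.strip input_symbol)
    match pvCanon.get? s with
    | some m => some (pvOrS (m.get? provider) s)
    | none =>
      match pvReverse.get? s with
      | some m => some (pvOrS (m.get? provider) s)
      | none => some input_symbol

-- ===== PRECONDITION & SPEC =====
def Spec_map_symbol_to_provider (input_symbol : String) (provider : String) (out : Option String) : Prop := out = map_symbol_to_provider_alt input_symbol provider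
instance (input_symbol : String) (provider : String) (out : Option String) : Decidable (Spec_map_symbol_to_provider input_symbol provider out) := by unfold Spec_map_symbol_to_provider; infer_instance

-- ===== CLAIM (what is proved, stated in full; the proofs are below) =====
def Claim_equal_map_symbol_to_provider : Prop := ∀ (input_symbol : String) (provider : String), Dom_map_symbol_to_provider input_symbol provider → Spec_map_symbol_to_provider input_symbol provider (map_symbol_to_provider input_symbol provider)

-- ===== LEMMAS AND PROOFS =====

-- the scan over the constant map agrees with a lookup in the reverse index
lemma pvScan_eq_reverse (s provider : String) :
    pvScan s provider pvCanon.items =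
      (pvReverse.get? s).map (fun m => pvOrS (m.get? provider) s) := by
  by_cases h1 : s = "GC=F"; · subst h1; rfl
  by_cases h2 : s = "GOLD"; · subst h2; rfl
  by_cases h3 : s = "GC"; · subst h3; rfl
  by_cases h4 : s = "SI=F"; · subst h4; rfl
  by_cases h5 : s = "SILVER"; · subst h5; rfl
  by_cases h6 : s = "SI"; · subst h6; rfl
  by_cases h7 : s = "BTC-USD"; · subst h7; rfl
  by_cases h8 : s = "BTCUSD"; · subst h8; rfl
  have hrev : pvReverse.get? s = none := by
    have : pvReverse = PySem.Dict.mk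
      [("GC=F",   PySem.Dict.ofList [("yfinance", "GC=F"),    ("fmp", "GOLD"),   ("polygon", "GC")]),
       ("GOLD",   PySem.Dict.ofList [("yfinance", "GC=F"),    ("fmp", "GOLD"),   ("polygon", "GC")]),
       ("GC",     PySem.Dict.ofList [("yfinance", "GC=F"),    ("fmp", "GOLD"),   ("polygon", "GC")]),
       ("SI=F",   PySem.Dict.ofList [("yfinance", "SI=F"),    ("fmp", "SILVER"), ("polygon", "SI")]),
       ("SILVER", PySem.Dict.ofList [("yfinance", "SI=F"),    ("fmp", "SILVER"), ("polygon", "SI")]),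
       ("SI",     PySem.Dict.ofList [("yfinance", "SI=F"),    ("fmp", "SILVER"), ("polygon", "SI")]),
       ("BTC-USD",PySem.Dict.ofList [("yfinance", "BTC-USD"), ("fmp", "BTCUSD"), ("polygon", "BTCUSD")]),
       ("BTCUSD", PySem.Dict.ofList [("yfinance", "BTC-USD"), ("fmp", "BTCUSD"), ("polygon", "BTCUSD")])] := by rfl
    rw [this]
    simp [beq_iff_eq, Ne.symm h1, Ne.symm h2, Ne.symm h3, Ne.symm h4,
      Ne.symm h5, Ne.symm h6, Ne.symm h7, Ne.symm h8, PySem.Dict.get?]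
  have u1 : PySem.Str.upper "GC=F" = "GC=F" := by decide
  have u2 : PySem.Str.upper "GOLD" = "GOLD" := by decide
  have u3 : PySem.Str.upper "GC" = "GC" := by decide
  have u4 : PySem.Str.upper "SI=F" = "SI=F" := by decide
  have u5 : PySem.Str.upper "SILVER" = "SILVER" := by decide
  have u6 : PySem.Str.upper "SI" = "SI" := by decide
  have u7 : PySem.Str.upper "BTC-USD" = "BTC-USD" := by decide
  have u8 : PySem.Str.upper "BTCUSD" = "BTCUSD" := by decide
  have hitems : pvCanon.items =
      [("GOLD",   PySem.Dict.ofList [("yfinance", "GC=F"),    ("fmp", "GOLD"),   ("polygon", "GC")]),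
       ("SILVER", PySem.Dict.ofList [("yfinance", "SI=F"),    ("fmp", "SILVER"), ("polygon", "SI")]),
       ("BTC",    PySem.Dict.ofList [("yfinance", "BTC-USD"), ("fmp", "BTCUSD"), ("polygon", "BTCUSD")])] := by rfl
  have i1 : (PySem.Dict.ofList [("yfinance", "GC=F"), ("fmp", "GOLD"), ("polygon", "GC")]).items
      = [("yfinance", "GC=F"), ("fmp", "GOLD"), ("polygon", "GC")] := rfl
  have i2 : (PySem.Dict.ofList [("yfinance", "SI=F"), ("fmp", "SILVER"), ("polygon", "SI")]).items
      = [("yfinance", "SI=F"), ("fmp", "SILVER"), ("polygon", "SI")] := rfl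
  have i3 : (PySem.Dict.ofList [("yfinance", "BTC-USD"), ("fmp", "BTCUSD"), ("polygon", "BTCUSD")]).items
      = [("yfinance", "BTC-USD"), ("fmp", "BTCUSD"), ("polygon", "BTCUSD")] := rfl
  rw [hrev, hitems]
  simp only [pvScan, pvScanInner, i1, i2, i3]
  simp [u1, u2, u3, u4, u5, u6, u7, u8, Ne.symm h1, Ne.symm h2, Ne.symm h3,
    Ne.symm h4, Ne.symm h5, Ne.symm h6, Ne.symm h7, Ne.symm h8]

-- ===== VERDICT (by name: the statement is the Claim_ definition above) =====
theorem map_symbol_to_provider_spec : Claim_equal_map_symbol_to_provider := by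
  intro input_symbol provider _
  unfold Spec_map_symbol_to_provider map_symbol_to_provider map_symbol_to_provider_alt
  by_cases h0 : input_symbol = ""
  · simp [h0]
  · simp only [h0, ite_false]
    cases hc : pvCanon.get? (PySem.Str.upper (PySem.Str.strip input_symbol)) with
    | some m => rfl
    | none =>
      rw [pvScan_eq_reverse]
      cases hr : pvReverse.get? (PySem.Str.upper (PySem.Str.strip input_symbol)) <;> simp
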